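-- pv_equiv track=rewrite | github.com/InbalWaiss/combat_gym | gym_combat/gym_combat/envs/Greedy/smart_player_map.py | find_move_in_path
-- ===== SOURCE A (Python) =====
-- def find_move_in_path(player_path):
--     i = 0
--     while i < len(player_path)-1 and player_path[i][:2] == player_path[i+1][:2] :
--         i += 1
--     if i < len(player_path)-1:
--         return player_path[i+1]
--     else:
--         return player_path[i]
-- ===== SOURCE B (Python) =====
-- def find_move_in_path(player_path):
--     first = player_path[0][:2]
--     moved = [p[:2] != first for p in player_path]
--     if True in moved:
--         return player_path[moved.index(True)]
--     return player_path[-1]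
-- ===== Notes on version B (the rewrite author's own statement) =====
-- stated objective: alternative
-- what changed: B replaces A's early-exit adjacent-pair while loop with two staged passes: it first materialises a boolean mask marking which elements' (x,y) differ from the start position, then uses membership plus list.index on that mask to pick the answer (or the last element when no mark exists).
import Mathlib
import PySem

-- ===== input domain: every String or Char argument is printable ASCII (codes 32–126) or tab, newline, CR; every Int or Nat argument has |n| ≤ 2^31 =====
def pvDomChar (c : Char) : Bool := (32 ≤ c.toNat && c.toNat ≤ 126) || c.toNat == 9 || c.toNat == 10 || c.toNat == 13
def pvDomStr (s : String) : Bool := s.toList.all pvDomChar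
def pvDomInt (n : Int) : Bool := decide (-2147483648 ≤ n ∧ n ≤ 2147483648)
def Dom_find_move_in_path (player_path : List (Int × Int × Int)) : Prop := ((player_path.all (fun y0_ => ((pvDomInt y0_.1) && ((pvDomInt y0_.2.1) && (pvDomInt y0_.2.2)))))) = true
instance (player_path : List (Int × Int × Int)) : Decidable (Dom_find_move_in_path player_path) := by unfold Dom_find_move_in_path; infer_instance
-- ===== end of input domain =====

-- B replaces A's early-exit while loop with two staged passes: a boolean mask of which elements
-- moved away from the start position, then membership + index on that mask; objective: alternative.

-- ===== PORT A =====
-- t[:2] on a 3-tuple: its first two components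
def pvFst2 (t : Int × Int × Int) : Int × Int := (t.1, t.2.1)

-- the while loop of A: advances i while i < len-1 and path[i][:2] == path[i+1][:2]
def find_move_in_path_while (player_path : List (Int × Int × Int)) (i : Nat) : Nat :=
  if i < player_path.length - 1 ∧
      (PySem.List.pyGet? player_path (i : Int)).map pvFst2 =
      (PySem.List.pyGet? player_path ((i : Int) + 1)).map pvFst2 then
    find_move_in_path_while player_path (i + 1)
  else
    i
termination_by player_path.length - i
decreasing_by omega

def find_move_in_path (player_path : List (Int × Int × Int)) : Int × Int × Int :=
  let i := find_move_in_path_while player_path 0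
  if i < player_path.length - 1 then
    (PySem.List.pyGet? player_path ((i : Int) + 1)).getD (0, 0, 0)
  else
    (PySem.List.pyGet? player_path (i : Int)).getD (0, 0, 0)

-- ===== PORT B =====
-- the mask pass of B: [p[:2] != first for p in player_path]
def pvMoved (first : Int × Int) (path : List (Int × Int × Int)) : List Bool :=
  path.map (fun p => decide (pvFst2 p ≠ first))

def find_move_in_path_alt (player_path : List (Int × Int × Int)) : Int × Int × Int :=
  let first := pvFst2 ((PySem.List.pyGet? player_path 0).getD (0, 0, 0))
  let moved := pvMoved first player_path
  if true ∈ moved then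
    (PySem.List.pyGet? player_path
      ((((PySem.List.index? moved true).getD 0 : Nat) : Int))).getD (0, 0, 0)
  else
    (PySem.List.pyGet? player_path (-1)).getD (0, 0, 0)

-- ===== PRECONDITION & SPEC =====
-- Both A and B raise IndexError on the empty list; Pre_ excludes exactly that input.
def Pre_find_move_in_path (player_path : List (Int × Int × Int)) : Prop := player_path ≠ []
instance (player_path : List (Int × Int × Int)) : Decidable (Pre_find_move_in_path player_path) := by unfold Pre_find_move_in_path; infer_instance
def pvWitness_find_move_in_path : (List (Int × Int × Int)) := [(0, 0, 0), (1, 0, 2)]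

def Spec_find_move_in_path (player_path : List (Int × Int × Int)) (out : Int × Int × Int) : Prop := out = find_move_in_path_alt player_path
instance (player_path : List (Int × Int × Int)) (out : Int × Int × Int) : Decidable (Spec_find_move_in_path player_path out) := by unfold Spec_find_move_in_path; infer_instance

-- ===== CLAIM (what is proved, stated in full; the proofs are below) =====
def Claim_equal_find_move_in_path : Prop := ∀ (player_path : List (Int × Int × Int)), Dom_find_move_in_path player_path → Pre_find_move_in_path player_path → Spec_find_move_in_path player_path (find_move_in_path player_path)

-- ===== LEMMAS AND PROOFS =====

-- shift: the while loop on x :: q starting at i+1 mirrors the loop on q starting at i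
lemma find_while_shift (x : Int × Int × Int) (q : List (Int × Int × Int)) (i : Nat) :
    find_move_in_path_while (x :: q) (i + 1) = find_move_in_path_while q i + 1 := by
  induction hf : q.length - i using Nat.strong_induction_on generalizing i with
  | _ fuel ih =>
    conv_lhs => rw [find_move_in_path_while]
    conv_rhs => rw [find_move_in_path_while]
    have h1 : PySem.List.pyGet? (x :: q) ((↑(i + 1) : Int)) = PySem.List.pyGet? q (i : Int) := by
      push_cast
      rw [show ((i : Int) + 1) = ((i : Int) + 1) from rfl, PySem.List.pyGet?_cons_succ]
    have h2 : PySem.List.pyGet? (x :: q) ((↑(i + 1) : Int) + 1) = PySem.List.pyGet? q ((i : Int) + 1) := by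
      push_cast
      rw [show ((i : Int) + 1 + 1) = ((i + 1 : Nat) : Int) + 1 by push_cast; ring, PySem.List.pyGet?_cons_succ]
      push_cast; rfl
    by_cases hc : i < q.length - 1 ∧
        (PySem.List.pyGet? q (i : Int)).map pvFst2 = (PySem.List.pyGet? q ((i : Int) + 1)).map pvFst2
    · rw [if_pos ⟨by simp; omega, by rw [h1, h2]; exact hc.2⟩, if_pos hc]
      subst hf; exact ih (q.length - (i + 1)) (by omega) (i + 1) rfl
    · rw [if_neg (fun h => hc ⟨by have := h.1; simp at this; omega,
        by have := h.2; rw [h1, h2] at this; exact this⟩), if_neg hc]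

-- on a singleton, both sides return the single element
lemma find_single (a : Int × Int × Int) : find_move_in_path [a] = a := by
  have h : find_move_in_path_while [a] 0 = 0 := by
    rw [find_move_in_path_while]; simp
  simp [find_move_in_path, h, PySem.List.pyGet?, PySem.List.pyIdx?]

lemma find_alt_single (a : Int × Int × Int) : find_move_in_path_alt [a] = a := by
  simp [find_move_in_path_alt, pvMoved, PySem.List.pyGet?_neg_one]

-- main induction: on a :: b :: t, either stop immediately or both recurse to b :: t
lemma find_eq (p : List (Int × Int × Int)) (hne : p ≠ []) :
    find_move_in_path p = find_move_in_path_alt p := by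
  induction p with
  | nil => exact absurd rfl hne
  | cons a q ih =>
    cases q with
    | nil => rw [find_single, find_alt_single]
    | cons b t =>
      have hA0 : PySem.List.pyGet? (a :: b :: t) (0 : Int) = some a := by
        simp [PySem.List.pyGet?_zero_cons]
      have hA1 : PySem.List.pyGet? (a :: b :: t) ((0 : Int) + 1) = some b := by
        rw [show ((0 : Int) + 1) = ((0 : Nat) : Int) + 1 by norm_num, PySem.List.pyGet?_cons_succ]
        simp
      by_cases hab : pvFst2 a = pvFst2 b
      · -- heads agree: A recurses via the shift lemma, B's mask is false :: mask of the tail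
        have hw : find_move_in_path_while (a :: b :: t) 0 =
            find_move_in_path_while (b :: t) 0 + 1 := by
          rw [find_move_in_path_while]
          simp only [Nat.cast_zero]
          rw [if_pos ⟨by simp, by rw [hA0, hA1]; simp only [Option.map_some]; exact congrArg some hab⟩]
          exact find_while_shift a (b :: t) 0
        have hAstep : find_move_in_path (a :: b :: t) = find_move_in_path (b :: t) := by
          unfold find_move_in_path
          rw [hw]
          set j := find_move_in_path_while (b :: t) 0 with hj
          have h1 : PySem.List.pyGet? (a :: b :: t) ((↑(j + 1) : Int)) =
              PySem.List.pyGet? (b :: t) (j : Int) := by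
            push_cast; rw [PySem.List.pyGet?_cons_succ]
          have h2 : PySem.List.pyGet? (a :: b :: t) ((↑(j + 1) : Int) + 1) =
              PySem.List.pyGet? (b :: t) ((j : Int) + 1) := by
            rw [show ((↑(j + 1) : Int) + 1) = ((j + 1 : Nat) : Int) + 1 by push_cast; ring,
              PySem.List.pyGet?_cons_succ]
            push_cast
            rfl
          simp only [List.length_cons]
          by_cases hlt : j < (b :: t).length - 1
      <;> simp only [List.length_cons] at hlt
          · rw [if_pos (by omega), if_pos (by simpa using hlt), h2]
          · rw [if_neg (by omega), if_neg (by simpa using hlt), h1]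
        have hBstep : find_move_in_path_alt (a :: b :: t) = find_move_in_path_alt (b :: t) := by
          unfold find_move_in_path_alt
          rw [hA0, PySem.List.pyGet?_zero_cons]
          simp only [Option.getD_some]
          rw [show pvFst2 b = pvFst2 a from hab.symm]
          have hmask : pvMoved (pvFst2 a) (a :: b :: t) =
              false :: pvMoved (pvFst2 a) (b :: t) := by
            simp [pvMoved]
          rw [hmask]
          by_cases hmem : true ∈ pvMoved (pvFst2 a) (b :: t)
          · rw [if_pos (by simp [hmem]), if_pos hmem]
            obtain ⟨k, hk⟩ := Option.isSome_iff_exists.mp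
              ((PySem.List.index?_isSome_iff _ true).mpr hmem)
            rw [PySem.List.index?_cons_of_ne _ (by simp), hk]
            simp only [Option.map_some, Option.getD_some]
            rw [show ((↑(k + 1) : Int)) = ((k : Nat) : Int) + 1 by push_cast; ring,
              PySem.List.pyGet?_cons_succ]
          · rw [if_neg (by simp [hmem]), if_neg hmem]
            rw [PySem.List.pyGet?_neg_one, PySem.List.pyGet?_neg_one]
            simp [List.getLast?]
        rw [hAstep, hBstep, ih (by simp)]
      · -- heads differ: both return b
        have hw : find_move_in_path_while (a :: b :: t) 0 = 0 := by
          rw [find_move_in_path_while]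
          simp only [Nat.cast_zero]
          rw [if_neg]
          intro ⟨_, hEq⟩
          rw [hA0, hA1] at hEq
          exact hab (by simpa using hEq)
        have hA : find_move_in_path (a :: b :: t) = b := by
          unfold find_move_in_path
          rw [hw]
          rw [if_pos (by simp)]
          simp only [Nat.cast_zero, hA1, Option.getD_some]
        have hB : find_move_in_path_alt (a :: b :: t) = b := by
          unfold find_move_in_path_alt
          rw [hA0]
          simp only [Option.getD_some]
          have hmask : pvMoved (pvFst2 a) (a :: b :: t) =
              false :: true :: pvMoved (pvFst2 a) t := by
            simp only [pvMoved, List.map_cons]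
            congr 2
            · simp
            · simp only [decide_eq_true_eq]
              exact fun h => hab h.symm
          rw [hmask]
          rw [if_pos (by simp)]
          rw [PySem.List.index?_cons_of_ne _ (by simp), PySem.List.index?_cons_self]
          simp only [Option.map_some, Option.getD_some]
          rw [show ((↑(0 + 1 : Nat)) : Int) = ((0 : Nat) : Int) + 1 by norm_num,
            PySem.List.pyGet?_cons_succ]
          simp
        rw [hA, hB]

-- ===== VERDICT (by name: the statement is the Claim_ definition above) =====
theorem find_move_in_path_spec : Claim_equal_find_move_in_path := by
  intro p _ hpre
  unfold Spec_find_move_in_path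
  exact find_eq p hpre
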